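-- pv_equiv track=rewrite | github.com/anatolyburtsev/advent-of-code | 2024/day22/main.py | evolve_n_times_v2
-- ===== SOURCE A (Python) =====
-- def mix(a: int, b: int) -> int:
--     return a ^ b
--
-- def prune(x: int) -> int:
--     return x % 16777216
--
-- def evolve_secret(x: int) -> int:
--     v1 = x * 64
--     x = mix(v1, x)
--     x = prune(x)
--     v4 = x // 32
--     x = mix(v4, x)
--     x = prune(x)
--     v5 = x * 2048
--     x = mix(v5, x)
--     x = prune(x)
--     return x
--
-- def evolve_n_times_v2(x: int, n: int) -> tuple[list[int], list[int]]:
--     result = []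
--     diffs = [None]
--     for _ in range(n):
--         result.append(x % 10)
--         x = evolve_secret(x)
--     for i in range(len(result) - 1):
--         diffs.append(result[i + 1] - result[i])
--     return result, diffs
-- ===== SOURCE B (Python) =====
-- def mix(a: int, b: int) -> int:
--     return a ^ b
--
-- def prune(x: int) -> int:
--     return x % 16777216
--
-- def evolve_secret(x: int) -> int:
--     v1 = x * 64
--     x = mix(v1, x)
--     x = prune(x)
--     v4 = x // 32
--     x = mix(v4, x)
--     x = prune(x)
--     v5 = x * 2048
--     x = mix(v5, x)
--     x = prune(x)
--     return x
--
-- def evolve_n_times_v2(x: int, n: int) -> tuple[list[int], list[int]]: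
--     # single pass: compute each digit once and its diff against the previous one
--     result = []
--     diffs = [None]
--     prev = None
--     for _ in range(n):
--         d = x % 10
--         result.append(d)
--         if prev is not None:
--             diffs.append(d - prev)
--         prev = d
--         x = evolve_secret(x)
--     return result, diffs
-- ===== Notes on version B (the rewrite author's own statement) =====
-- stated objective: alternative
-- what changed: Fuses A's two loops into one generation pass that tracks the previous digit and emits each diff immediately, instead of rescanning the result list by index afterward.
import Mathlib
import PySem

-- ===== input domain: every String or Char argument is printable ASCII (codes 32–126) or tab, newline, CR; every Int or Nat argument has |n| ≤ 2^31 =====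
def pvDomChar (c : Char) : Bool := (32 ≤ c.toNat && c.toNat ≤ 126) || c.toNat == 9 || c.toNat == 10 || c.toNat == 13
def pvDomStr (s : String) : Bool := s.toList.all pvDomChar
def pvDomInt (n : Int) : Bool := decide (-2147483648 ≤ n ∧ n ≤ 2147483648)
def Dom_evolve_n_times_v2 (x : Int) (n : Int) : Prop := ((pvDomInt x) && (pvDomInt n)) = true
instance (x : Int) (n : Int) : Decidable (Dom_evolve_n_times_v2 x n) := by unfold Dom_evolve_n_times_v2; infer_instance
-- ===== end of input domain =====

-- B fuses A's two loops into one generation pass that tracks the previous digit (objective: alternative decomposition, same cost).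

-- ===== PORT A =====
def pyMix (a b : Int) : Int := PySem.Int.bxor a b

def pyPrune (x : Int) : Int := PySem.Int.mod x 16777216

def pyEvolveSecret (x : Int) : Int :=
  let v1 := x * 64
  let x := pyMix v1 x
  let x := pyPrune x
  let v4 := PySem.Int.floordiv x 32
  let x := pyMix v4 x
  let x := pyPrune x
  let v5 := x * 2048
  let x := pyMix v5 x
  let x := pyPrune x
  x

-- first loop of A: for _ in range(n): result.append(x % 10); x = evolve_secret(x)
def pyLoopA : Nat → Int → List Int → List Int × Int
  | 0, x, result => (result, x)
  | k+1, x, result => pyLoopA k (pyEvolveSecret x) (result ++ [PySem.Int.mod x 10])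

-- second loop of A: for i in range(len(result)-1): diffs.append(result[i+1]-result[i])
def pyDiffsLoop (result : List Int) : List (Option Int) :=
  (PySem.List.pyRange 0 ((result.length : Int) - 1) 1).foldl
    (fun ds i => ds ++ [some (PySem.List.pyGetD result (i + 1) 0 - PySem.List.pyGetD result i 0)])
    [none]

def evolve_n_times_v2 (x : Int) (n : Int) : List Int × List (Option Int) :=
  ((pyLoopA n.toNat x []).1, pyDiffsLoop (pyLoopA n.toNat x []).1)

-- ===== PORT B =====
-- single loop of B, carrying the previous digit
def pyLoopB : Nat → Int → Option Int → List Int → List (Option Int) → List Int × List (Option Int)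
  | 0, _, _, result, diffs => (result, diffs)
  | k+1, x, prev, result, diffs =>
    let d := PySem.Int.mod x 10
    let diffs' := match prev with
      | none => diffs
      | some p => diffs ++ [some (d - p)]
    pyLoopB k (pyEvolveSecret x) (some d) (result ++ [d]) diffs'

def evolve_n_times_v2_alt (x : Int) (n : Int) : List Int × List (Option Int) :=
  pyLoopB n.toNat x none [] [none]

-- ===== PRECONDITION & SPEC =====
def Spec_evolve_n_times_v2 (x : Int) (n : Int) (out : List Int × List (Option Int)) : Prop := out = evolve_n_times_v2_alt x n
instance (x : Int) (n : Int) (out : List Int × List (Option Int)) : Decidable (Spec_evolve_n_times_v2 x n out) := by unfold Spec_evolve_n_times_v2; infer_instance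

-- ===== CLAIM (what is proved, stated in full; the proofs are below) =====
def Claim_equal_evolve_n_times_v2 : Prop := ∀ (x : Int) (n : Int), Dom_evolve_n_times_v2 x n → Spec_evolve_n_times_v2 x n (evolve_n_times_v2 x n)

-- ===== LEMMAS AND PROOFS =====

-- the digit sequence both programs generate
def pvDigits : Int → Nat → List Int
  | _, 0 => []
  | x, k+1 => PySem.Int.mod x 10 :: pvDigits (pyEvolveSecret x) k

-- adjacent differences
def pvDiffs : List Int → List (Option Int)
  | [] => []
  | [_] => []
  | a :: b :: t => some (b - a) :: pvDiffs (b :: t)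

theorem pyLoopA_fst (k : Nat) : ∀ (x : Int) (res : List Int),
    (pyLoopA k x res).1 = res ++ pvDigits x k := by
  induction k with
  | zero => intro x res; simp [pyLoopA, pvDigits]
  | succ k ih => intro x res; simp [pyLoopA, pvDigits, ih]

theorem foldl_append_map {α β : Type} (xs : List α) (f : α → β) (ds0 : List β) :
    xs.foldl (fun ds i => ds ++ [f i]) ds0 = ds0 ++ xs.map f := by
  induction xs generalizing ds0 with
  | nil => simp
  | cons a t ih => simp [List.foldl_cons, ih]

theorem map_range_pvDiffs : ∀ (l : List Int),
    (List.range (l.length - 1)).map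
      (fun k => some (l.getD (k + 1) 0 - l.getD k 0)) = pvDiffs l := by
  intro l
  induction l with
  | nil => simp [pvDiffs]
  | cons a t ih =>
    cases t with
    | nil => simp [pvDiffs]
    | cons b t' =>
      have hlen : (a :: b :: t').length - 1 = (b :: t').length - 1 + 1 := by simp
      rw [hlen, List.range_succ_eq_map]
      simp only [List.map_cons, List.map_map]
      rw [show ((fun k => some ((a :: b :: t').getD (k + 1) 0 - (a :: b :: t').getD k 0)) ∘ Nat.succ)
            = (fun k => some ((b :: t').getD (k + 1) 0 - (b :: t').getD k 0)) from rfl]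
      rw [ih]
      simp [pvDiffs]

theorem evolve_A_eq (x : Int) (n : Int) :
    evolve_n_times_v2 x n = (pvDigits x n.toNat, none :: pvDiffs (pvDigits x n.toNat)) := by
  unfold evolve_n_times_v2 pyDiffsLoop
  rw [pyLoopA_fst]
  simp only [List.nil_append]
  congr 1
  have key : ∀ (l : List Int),
      (List.range (l.length - 1)).map
        (fun y : Nat => some (PySem.List.pyGetD l (0 + (y : Int) + 1) 0 - PySem.List.pyGetD l (0 + (y : Int)) 0))
      = pvDiffs l := by
    intro l
    rw [← map_range_pvDiffs l]
    apply List.map_congr_left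
    intro k _
    rw [show (0 + (k : Int) + 1) = (((k + 1 : Nat)) : Int) by push_cast; ring,
        show (0 + (k : Int)) = ((k : Nat) : Int) from (zero_add _),
        PySem.List.pyGetD_natCast, PySem.List.pyGetD_natCast]
  rw [PySem.List.pyRange_one]
  simp only [List.foldl_map]
  rw [show ((((pvDigits x n.toNat).length : Int) - 1) - 0).toNat
        = (pvDigits x n.toNat).length - 1 by omega]
  rw [foldl_append_map, key]
  rfl

theorem pyLoopB_some (k : Nat) : ∀ (x p : Int) (res : List Int) (ds : List (Option Int)),
    pyLoopB k x (some p) res ds = (res ++ pvDigits x k, ds ++ pvDiffs (p :: pvDigits x k)) := by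
  induction k with
  | zero => intro x p res ds; simp [pyLoopB, pvDigits, pvDiffs]
  | succ k ih =>
    intro x p res ds
    simp only [pyLoopB, ih, pvDigits, pvDiffs]
    simp

theorem pyLoopB_none (k : Nat) (x : Int) (res : List Int) (ds : List (Option Int)) :
    pyLoopB k x none res ds = (res ++ pvDigits x k, ds ++ pvDiffs (pvDigits x k)) := by
  cases k with
  | zero => simp [pyLoopB, pvDigits, pvDiffs]
  | succ k =>
    simp only [pyLoopB, pyLoopB_some, pvDigits]
    simp

-- ===== VERDICT (by name: the statement is the Claim_ definition above) =====
theorem evolve_n_times_v2_spec : Claim_equal_evolve_n_times_v2 := by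
  intro x n _
  unfold Spec_evolve_n_times_v2 evolve_n_times_v2_alt
  rw [evolve_A_eq, pyLoopB_none]
  simp
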